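-- pv_equiv track=rewrite | github.com/IzhykOleh/codewars-solutions | Fractions class.py | common_div
-- ===== SOURCE A (Python) =====
-- def common_div(a,b):
--     li_a, li_b = [], []
--     for x in range(2, a+1):
--         if a%x==0:
--             li_a+=[x]
--     for y in range(2, b+1):
--         if b%y==0:
--             li_b+=[y]
--     try:
--         return max(set(li_a).intersection(set(li_b)))
--     except ValueError:
--         return 0
-- ===== SOURCE B (Python) =====
-- def common_div(a, b):
--     for x in range(min(a, b), 1, -1):
--         if a % x == 0 and b % x == 0:
--             return x
--     return 0
-- ===== Notes on version B (the rewrite author's own statement) =====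
-- stated objective: faster
-- what changed: Replaces A's two divisor-table passes plus set intersection and max with a single descending early-exit scan from min(a,b) down to 2 that returns the first common divisor found.
import Mathlib
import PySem

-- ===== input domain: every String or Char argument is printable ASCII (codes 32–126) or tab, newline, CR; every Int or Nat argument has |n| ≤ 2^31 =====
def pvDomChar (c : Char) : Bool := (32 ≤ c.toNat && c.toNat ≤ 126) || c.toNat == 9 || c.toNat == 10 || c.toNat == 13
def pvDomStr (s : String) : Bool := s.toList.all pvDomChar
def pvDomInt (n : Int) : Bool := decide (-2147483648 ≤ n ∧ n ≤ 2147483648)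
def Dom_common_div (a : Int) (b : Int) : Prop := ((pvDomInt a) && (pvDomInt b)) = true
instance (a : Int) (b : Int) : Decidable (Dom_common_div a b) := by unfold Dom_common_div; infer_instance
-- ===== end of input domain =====

-- B replaces A's two divisor-table passes + set intersection + max with one descending
-- early-exit scan from min(a,b) down to 2 (objective: faster, measured).

-- ===== PORT A =====
def common_div (a : Int) (b : Int) : Int :=
  let li_a := (PySem.List.pyRange 2 (a+1) 1).foldl
      (fun acc x => if PySem.Int.mod a x == 0 then acc ++ [x] else acc) []
  let li_b := (PySem.List.pyRange 2 (b+1) 1).foldl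
      (fun acc y => if PySem.Int.mod b y == 0 then acc ++ [y] else acc) []
  -- max(set) over Int: order-independent, ported as max? of the intersection Set
  match PySem.List.max? (PySem.Set.inter (PySem.Set.ofList li_a) (PySem.Set.ofList li_b)) (fun x => x) with
  | some m => m
  | none => 0

-- ===== PORT B =====
def common_div_alt (a : Int) (b : Int) : Int :=
  match (PySem.List.pyRange (min a b) 1 (-1)).find?
      (fun x => PySem.Int.mod a x == 0 && PySem.Int.mod b x == 0) with
  | some x => x
  | none => 0

-- ===== PRECONDITION & SPEC =====
def Spec_common_div (a : Int) (b : Int) (out : Int) : Prop := out = common_div_alt a b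
instance (a : Int) (b : Int) (out : Int) : Decidable (Spec_common_div a b out) := by unfold Spec_common_div; infer_instance

-- ===== CLAIM (what is proved, stated in full; the proofs are below) =====
def Claim_equal_common_div : Prop := ∀ (a : Int) (b : Int), Dom_common_div a b → Spec_common_div a b (common_div a b)

-- ===== LEMMAS AND PROOFS =====

-- On a strictly descending list, find? returns a maximal satisfier.
theorem find?_pairwise_gt_isMax {l : List Int} {q : Int → Bool} {x : Int}
    (h : l.Pairwise (· > ·)) (hx : l.find? q = some x) :
    ∀ y ∈ l, q y = true → y ≤ x := by
  induction l with
  | nil => simp at hx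
  | cons d t ih =>
    rw [List.find?_cons] at hx
    rcases List.pairwise_cons.mp h with ⟨hd, ht⟩
    cases hq : q d with
    | true =>
      rw [hq] at hx
      injection hx with hx; subst hx
      intro y hy _
      rcases List.mem_cons.mp hy with rfl | hyt
      · exact le_refl _
      · exact le_of_lt (hd y hyt)
    | false =>
      rw [hq] at hx
      intro y hy hqy
      rcases List.mem_cons.mp hy with rfl | hyt
      · rw [hq] at hqy; exact absurd hqy (by simp)
      · exact ih ht hx y hyt hqy

-- Membership in A's intersection list: exactly the common divisors in [2, min a b].
theorem mem_A_inter (a b x : Int) :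
    x ∈ PySem.Set.inter
        (PySem.Set.ofList ((PySem.List.pyRange 2 (a+1) 1).foldl
          (fun acc x => if PySem.Int.mod a x == 0 then acc ++ [x] else acc) []))
        (PySem.Set.ofList ((PySem.List.pyRange 2 (b+1) 1).foldl
          (fun acc y => if PySem.Int.mod b y == 0 then acc ++ [y] else acc) [])) ↔
      2 ≤ x ∧ x ≤ min a b ∧ x ∣ a ∧ x ∣ b := by
  rw [PySem.Set.mem_inter, PySem.Set.mem_ofList, PySem.Set.mem_ofList,
      PySem.List.foldl_append_if_eq_filter, PySem.List.foldl_append_if_eq_filter]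
  simp only [List.nil_append, List.mem_filter, PySem.List.mem_pyRange_one,
    beq_iff_eq, PySem.Int.mod_eq_zero_iff_dvd]
  constructor
  · rintro ⟨⟨⟨h2, ha⟩, hda⟩, ⟨_, hb⟩, hdb⟩
    exact ⟨h2, le_min (by omega) (by omega), hda, hdb⟩
  · rintro ⟨h2, hm, hda, hdb⟩
    have ha := le_min_iff.mp hm
    exact ⟨⟨⟨h2, by omega⟩, hda⟩, ⟨⟨h2, by omega⟩, hdb⟩⟩

-- B's test holds iff x divides both.
theorem test_iff (a b x : Int) :
    ((PySem.Int.mod a x == 0 && PySem.Int.mod b x == 0) = true) ↔ x ∣ a ∧ x ∣ b := by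
  simp [PySem.Int.mod_eq_zero_iff_dvd]

theorem descending_pairwise (m : Int) :
    (PySem.List.pyRange m 1 (-1)).Pairwise (· > ·) := by
  rw [PySem.List.pyRange_neg_one_eq_reverse]
  exact (List.pairwise_reverse).mpr (PySem.List.pairwise_lt_pyRange_one _ _)

-- ===== VERDICT (by name: the statement is the Claim_ definition above) =====
theorem common_div_spec : Claim_equal_common_div := by
  intro a b _
  unfold Spec_common_div common_div common_div_alt
  simp only
  set q : Int → Bool := fun x => PySem.Int.mod a x == 0 && PySem.Int.mod b x == 0 with hq
  set L := PySem.Set.inter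
        (PySem.Set.ofList ((PySem.List.pyRange 2 (a+1) 1).foldl
          (fun acc x => if PySem.Int.mod a x == 0 then acc ++ [x] else acc) []))
        (PySem.Set.ofList ((PySem.List.pyRange 2 (b+1) 1).foldl
          (fun acc y => if PySem.Int.mod b y == 0 then acc ++ [y] else acc) [])) with hL
  have hmemL : ∀ x, x ∈ L ↔ 2 ≤ x ∧ x ≤ min a b ∧ x ∣ a ∧ x ∣ b := fun x => mem_A_inter a b x
  cases hfind : (PySem.List.pyRange (min a b) 1 (-1)).find? q with
  | none =>
    have hnone : ∀ y ∈ PySem.List.pyRange (min a b) 1 (-1), ¬ q y = true :=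
      fun y hy => by
        have := List.find?_eq_none.mp hfind y hy; simpa using this
    have hLnil : L = [] := by
      apply List.eq_nil_iff_forall_not_mem.mpr
      intro x hx
      rcases (hmemL x).mp hx with ⟨h2, hm, hda, hdb⟩
      refine hnone x ?_ ((test_iff a b x).mpr ⟨hda, hdb⟩)
      exact (PySem.List.mem_pyRange_neg_one).mpr ⟨by omega, hm⟩
    rw [hLnil]
    simp [PySem.List.max?]
  | some x =>
    have hqx : q x = true := List.find?_some hfind
    have hxmem : x ∈ PySem.List.pyRange (min a b) 1 (-1) := List.mem_of_find?_eq_some hfind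
    rcases (PySem.List.mem_pyRange_neg_one).mp hxmem with ⟨h1, hm⟩
    rcases (test_iff a b x).mp hqx with ⟨hda, hdb⟩
    have hxL : x ∈ L := (hmemL x).mpr ⟨by omega, hm, hda, hdb⟩
    cases hmax : PySem.List.max? L (fun x => x) with
    | none =>
      rw [PySem.List.max?_eq_none_iff] at hmax
      rw [hmax] at hxL; simp at hxL
    | some mx =>
      have hmxL : mx ∈ L := PySem.List.max?_mem hmax
      rcases (hmemL mx).mp hmxL with ⟨h2', hm', hda', hdb'⟩
      have hmx_le : mx ≤ x := by
        refine find?_pairwise_gt_isMax (descending_pairwise (min a b)) hfind mx ?_ ?_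
        · exact (PySem.List.mem_pyRange_neg_one).mpr ⟨by omega, hm'⟩
        · exact (test_iff a b mx).mpr ⟨hda', hdb'⟩
      have hx_le : x ≤ mx := PySem.List.max?_isMax hmax x hxL
      have : mx = x := le_antisymm hmx_le hx_le
      simp [this]
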